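-- pv_equiv track=rewrite | github.com/DGRC-PT/SVInterpreter | svinterpreter_aux/test_best_hit.py | get_val_from_val
-- ===== SOURCE A (Python) =====
-- def get_val_from_val(dic, top):
-- 	r=top*-1
-- 	dd=[]
-- 	indxs=set([])
-- 	for key, value in dic.items():
-- 		dd.append(value)
-- 	gg=(sorted(dd)[r:])
-- 	for el in gg:
-- 		jj=gg.index(el)
-- 		indxs.add(jj)
-- 	return gg, indxs
-- ===== SOURCE B (Python) =====
-- def get_val_from_val(dic, top):
--     gg = sorted(dic.values())[-top:]
--     indxs = {i for i, v in enumerate(gg) if i == 0 or gg[i - 1] != v}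
--     return gg, indxs
-- ===== Notes on version B (the rewrite author's own statement) =====
-- stated objective: faster
-- what changed: A re-scans the sorted slice with gg.index(el) for every element (quadratic); B takes the same sorted slice and collects the first-occurrence indices in one pass by keeping each index whose value differs from its predecessor.
import Mathlib
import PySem

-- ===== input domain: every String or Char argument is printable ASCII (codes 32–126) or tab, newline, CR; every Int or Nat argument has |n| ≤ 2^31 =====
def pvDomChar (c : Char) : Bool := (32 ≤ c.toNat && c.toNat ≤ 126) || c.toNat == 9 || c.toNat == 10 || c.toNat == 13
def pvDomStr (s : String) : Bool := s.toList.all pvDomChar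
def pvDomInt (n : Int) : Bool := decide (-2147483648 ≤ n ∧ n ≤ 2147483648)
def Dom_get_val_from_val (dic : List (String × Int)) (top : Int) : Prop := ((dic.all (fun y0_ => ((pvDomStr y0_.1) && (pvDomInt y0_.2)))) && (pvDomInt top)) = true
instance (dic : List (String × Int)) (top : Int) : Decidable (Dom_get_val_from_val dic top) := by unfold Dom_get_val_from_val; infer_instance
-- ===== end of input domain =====

-- B replaces A's quadratic inner gg.index scan by a single pass over the sorted slice that keeps
-- the index wherever the adjacent value changes (objective: faster).

-- ===== PORT A =====
-- gg.index(el) never raises here (el ∈ gg), so the Option is discharged with getD 0 (never taken).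
def get_val_from_val (dic : List (String × Int)) (top : Int) : List Int × List Int :=
  let r : Int := top * -1
  let dd : List Int := dic.foldl (fun acc kv => acc ++ [kv.2]) []
  let gg : List Int := PySem.List.slice (PySem.List.sorted dd (fun x => x)) (some r) none
  let indxs : PySem.Set Int :=
    gg.foldl (fun s el => PySem.Set.add s (((PySem.List.index? gg el).getD 0 : Nat) : Int)) PySem.Set.empty
  (gg, indxs)

-- ===== PORT B =====
def get_val_from_val_alt (dic : List (String × Int)) (top : Int) : List Int × List Int :=
  let gg : List Int := PySem.List.slice (PySem.List.sorted (dic.map Prod.snd) (fun x => x)) (some (-top)) none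
  let indxs : PySem.Set Int := PySem.Set.ofList
    (((PySem.List.enumerate gg).filter
        (fun p => p.1 == 0 || !(PySem.List.pyGetD gg (p.1 - 1) 0 == p.2))).map Prod.fst)
  (gg, indxs)

-- ===== PRECONDITION & SPEC =====
def Spec_get_val_from_val (dic : List (String × Int)) (top : Int) (out : List Int × List Int) : Prop := out = get_val_from_val_alt dic top
instance (dic : List (String × Int)) (top : Int) (out : List Int × List Int) : Decidable (Spec_get_val_from_val dic top out) := by unfold Spec_get_val_from_val; infer_instance

-- ===== CLAIM (what is proved, stated in full; the proofs are below) =====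
def Claim_equal_get_val_from_val : Prop := ∀ (dic : List (String × Int)) (top : Int), Dom_get_val_from_val dic top → Spec_get_val_from_val dic top (get_val_from_val dic top)

-- ===== LEMMAS AND PROOFS =====

-- membership in enumerate
theorem mem_enumerate_iff {α : Type} (xs : List α) (s : Int) (p : Int × α) :
    p ∈ PySem.List.enumerate xs s ↔ ∃ (i : Nat) (h : i < xs.length), p = (s + i, xs[i]) := by
  induction xs generalizing s with
  | nil => simp [PySem.List.enumerate_nil]
  | cons x xs ih =>
    simp only [PySem.List.enumerate_cons, List.mem_cons, ih]
    constructor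
    · rintro (rfl | ⟨i, h, rfl⟩)
      · exact ⟨0, by simp, by simp⟩
      · refine ⟨i + 1, by simpa using h, ?_⟩
        simp only [List.getElem_cons_succ]
        congr 1
        push_cast
        ring
    · rintro ⟨i, h, rfl⟩
      cases i with
      | zero => left; simp
      | succ i =>
        right
        refine ⟨i, by simpa using h, ?_⟩
        simp only [List.getElem_cons_succ]
        congr 1
        push_cast
        ring

-- foldl of Set.add produces the start set followed by a sublist of the input
theorem foldl_add_sublist {α : Type} [BEq α] (l : List α) (s : List α) :
    ∃ t, l.foldl PySem.Set.add s = s ++ t ∧ t.Sublist l := by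
  induction l generalizing s with
  | nil => exact ⟨[], by simp, by simp⟩
  | cons x l ih =>
    simp only [List.foldl_cons]
    by_cases h : s.contains x
    · obtain ⟨t, ht, hsub⟩ := ih s
      refine ⟨t, ?_, hsub.cons _⟩
      have hadd : PySem.Set.add s x = s := by simp [PySem.Set.add, h]
      rw [hadd, ht]
    · obtain ⟨t, ht, hsub⟩ := ih (s ++ [x])
      refine ⟨x :: t, ?_, hsub.cons₂ _⟩
      have hadd : PySem.Set.add s x = s ++ [x] := by simp [PySem.Set.add, h]
      rw [hadd, ht, List.append_assoc]
      rfl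

theorem ofList_sublist {α : Type} [BEq α] (l : List α) : (PySem.Set.ofList l).Sublist l := by
  obtain ⟨t, ht, hsub⟩ := foldl_add_sublist l ([] : List α)
  simpa [PySem.Set.ofList, ht] using hsub

theorem ofList_eq_self_of_nodup {α : Type} [BEq α] [LawfulBEq α] (l : List α) (h : l.Nodup) :
    PySem.Set.ofList l = l := by
  have hperm : (PySem.Set.ofList l).Perm l :=
    (List.perm_ext_iff_of_nodup (PySem.Set.nodup_ofList l) h).2 (fun a => PySem.Set.mem_ofList l a)
  exact (ofList_sublist l).eq_of_length hperm.length_eq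

-- the heart: on a sorted list, the set of first-occurrence indices (A's way)
-- equals the set of positions where the adjacent value changes (B's way)
theorem firstIdx_eq_changePoints (gg : List Int) (hs : gg.Pairwise (· ≤ ·)) :
    gg.foldl (fun s el => PySem.Set.add s (((PySem.List.index? gg el).getD 0 : Nat) : Int)) PySem.Set.empty
      = PySem.Set.ofList (((PySem.List.enumerate gg).filter
          (fun p => p.1 == 0 || !(PySem.List.pyGetD gg (p.1 - 1) 0 == p.2))).map Prod.fst) := by
  have hget : ∀ (i j : Nat) (hi : i < gg.length) (hj : j < gg.length), i ≤ j → gg[i] ≤ gg[j] := by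
    intro i j hi hj hij
    rcases Nat.lt_or_ge i j with h | h
    · exact (List.pairwise_iff_getElem.1 hs) i j hi hj h
    · have : i = j := Nat.le_antisymm hij h
      subst this; rfl
  -- A's fold is Set.ofList of the mapped list
  have hA : gg.foldl (fun s el => PySem.Set.add s (((PySem.List.index? gg el).getD 0 : Nat) : Int)) PySem.Set.empty
      = PySem.Set.ofList (gg.map (fun el => (((PySem.List.index? gg el).getD 0 : Nat) : Int))) := by
    simp [PySem.Set.ofList, List.foldl_map]
  set fi : Int → Nat := fun el => (PySem.List.index? gg el).getD 0 with hfi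
  -- index? facts: for each position i, gg.index(gg[i]) is the first occurrence of gg[i]
  have hidx : ∀ (i : Nat) (hi : i < gg.length),
      ∃ k, PySem.List.index? gg gg[i] = some k ∧ k ≤ i ∧ ∃ hk : k < gg.length,
        gg[k] = gg[i] ∧ ∀ j, j < k → ∀ hj : j < gg.length, gg[j] ≠ gg[i] := by
    intro i hi
    have hmem : gg[i] ∈ gg := List.getElem_mem hi
    have hsome : (List.idxOf? gg[i] gg).isSome = true := List.isSome_idxOf?.2 hmem
    obtain ⟨k, hk⟩ := Option.isSome_iff_exists.1 hsome
    obtain ⟨hklt, hkeq, hkmin⟩ := (List.idxOf?_eq_some_iff).1 hk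
    refine ⟨k, by simpa [PySem.List.index?] using hk, ?_, hklt, hkeq, ?_⟩
    · by_contra hlt
      exact hkmin i (Nat.lt_of_not_le hlt) rfl
    · intro j hj hj' hc; exact hkmin j hj hc
  -- the mapped list of first-occurrence indices is nondecreasing
  have hMle : (gg.map (fun el => ((fi el : Nat) : Int))).Pairwise (· ≤ ·) := by
    rw [List.pairwise_map, List.pairwise_iff_getElem]
    intro i j hi hj hij
    obtain ⟨ki, hki, hkii, hkilt, hkieq, hkimin⟩ := hidx i hi
    obtain ⟨kj, hkj, hkjj, hkjlt, hkjeq, hkjmin⟩ := hidx j hj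
    simp only [hfi, hki, hkj, Option.getD_some]
    by_contra hlt
    have hkjki : kj < ki := by omega
    have h1 : gg[i] ≤ gg[j] := hget i j hi hj (Nat.le_of_lt hij)
    have h2 : gg[kj] ≤ gg[i] := hget kj i hkjlt hi (Nat.le_trans (Nat.le_of_lt hkjki) hkii)
    have h3 : gg[kj] = gg[i] := le_antisymm h2 (by rw [hkjeq]; exact h1)
    exact hkimin kj hkjki hkjlt h3
  set L : List Int := ((PySem.List.enumerate gg).filter
      (fun p => p.1 == 0 || !(PySem.List.pyGetD gg (p.1 - 1) 0 == p.2))).map Prod.fst with hL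
  -- L is strictly increasing
  have hLlt : L.Pairwise (· < ·) := by
    have h1 : (PySem.List.enumerate gg).Pairwise (fun p q => p.1 < q.1) := by
      rw [← List.pairwise_map]
      rw [PySem.List.map_fst_enumerate]
      exact PySem.List.pairwise_lt_pyRange_one 0 (0 + gg.length)
    exact List.pairwise_map.2 (h1.filter _)
  -- LHS list is strictly increasing too
  have hAle : (PySem.Set.ofList (gg.map (fun el => ((fi el : Nat) : Int)))).Pairwise (· ≤ ·) :=
    hMle.sublist (ofList_sublist _)
  have hAnd : (PySem.Set.ofList (gg.map (fun el => ((fi el : Nat) : Int)))).Nodup :=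
    PySem.Set.nodup_ofList _
  have hAlt : (PySem.Set.ofList (gg.map (fun el => ((fi el : Nat) : Int)))).Pairwise (· < ·) := by
    refine (hAle.and hAnd).imp ?_
    rintro a b ⟨hle, hne⟩; exact lt_of_le_of_ne hle hne
  -- membership agrees
  have hmemiff : ∀ x : Int, x ∈ PySem.Set.ofList (gg.map (fun el => ((fi el : Nat) : Int))) ↔ x ∈ L := by
    intro x
    rw [PySem.Set.mem_ofList, List.mem_map]
    constructor
    · rintro ⟨a, ha, rfl⟩
      obtain ⟨m, hm, rfl⟩ := List.mem_iff_getElem.1 ha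
      obtain ⟨k, hk, hkm, hklt, hkeq, hkmin⟩ := hidx m hm
      simp only [hfi, hk, Option.getD_some, hL, List.mem_map]
      refine ⟨((k : Int), gg[k]), List.mem_filter.2 ⟨?_, ?_⟩, rfl⟩
      · exact (mem_enumerate_iff gg 0 _).2 ⟨k, hklt, by simp⟩
      · cases k with
        | zero => simp
        | succ k' =>
          have hk' : k' < gg.length := Nat.lt_of_succ_lt hklt
          have hne : gg[k'] ≠ gg[k' + 1] := by
            intro hcontra
            exact hkmin k' (Nat.lt_succ_self k') hk' (hcontra.trans hkeq)
          have hc : ((k' + 1 : Nat) : Int) - 1 = ((k' : Nat) : Int) := by push_cast; ring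
          simp only [hc, PySem.List.pyGetD_natCast, Bool.or_eq_true]
          right
          simp [List.getD_eq_getElem?_getD, List.getElem?_eq_getElem hk', hne]
    · intro hx
      simp only [hL, List.mem_map] at hx
      obtain ⟨p, hp, rfl⟩ := hx
      obtain ⟨hpe, hpf⟩ := List.mem_filter.1 hp
      obtain ⟨i, hi, rfl⟩ := (mem_enumerate_iff gg 0 p).1 hpe
      simp only [zero_add] at hpf ⊢
      refine ⟨gg[i], List.getElem_mem hi, ?_⟩
      -- show gg.index(gg[i]) = i, i.e. nothing before i equals gg[i]
      have hmin : ∀ j (hj : j < i), gg[j]'(Nat.lt_trans hj hi) ≠ gg[i] := by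
        intro j hj hcontra
        have hj' : j < gg.length := Nat.lt_trans hj hi
        cases i with
        | zero => omega
        | succ i' =>
          have hi' : i' < gg.length := Nat.lt_of_succ_lt hi
          have hne : gg[i'] ≠ gg[i' + 1] := by
            have hc : ((i' + 1 : Nat) : Int) - 1 = ((i' : Nat) : Int) := by push_cast; ring
            simp only [hc, PySem.List.pyGetD_natCast, Bool.or_eq_true] at hpf
            rcases hpf with h | h
            · exfalso
              have : ((i' + 1 : Nat) : Int) = 0 := by simpa using h
              omega
            · simpa [List.getD_eq_getElem?_getD, List.getElem?_eq_getElem hi'] using h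
          have hjle : j ≤ i' := Nat.lt_succ_iff.1 hj
          have h1 : gg[j] ≤ gg[i'] := hget j i' hj' hi' hjle
          have h2 : gg[i'] ≤ gg[i' + 1] := hget i' (i' + 1) hi' hi (Nat.le_succ _)
          have h3 : gg[i' + 1] ≤ gg[i'] := by rw [← hcontra]; exact h1
          exact hne (le_antisymm h2 h3)
      have hsome : List.idxOf? gg[i] gg = some i :=
        (List.idxOf?_eq_some_iff).2 ⟨hi, rfl, fun j hj => hmin j hj⟩
      simp [hfi, PySem.List.index?, hsome]
  -- conclude: both strictly increasing lists with the same members are equal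
  have hLnd : L.Nodup := hLlt.imp ne_of_lt
  have hperm : L.Perm (PySem.Set.ofList (gg.map (fun el => ((fi el : Nat) : Int)))) :=
    (List.perm_ext_iff_of_nodup hLnd hAnd).2 (fun a => (hmemiff a).symm)
  have e1 := PySem.List.sorted_eq_of_perm_of_pairwise_lt
      (PySem.Set.ofList (gg.map (fun el => ((fi el : Nat) : Int)))) L (fun x => x) hperm hLlt
  have e2 := PySem.List.sorted_eq_of_perm_of_pairwise_lt
      (PySem.Set.ofList (gg.map (fun el => ((fi el : Nat) : Int)))) _ (fun x => x) (List.Perm.refl _) hAlt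
  rw [hA, ← e2, e1]
  exact (ofList_eq_self_of_nodup L hLnd).symm

-- ===== VERDICT (by name: the statement is the Claim_ definition above) =====
theorem get_val_from_val_spec : Claim_equal_get_val_from_val := by
  intro dic top _
  unfold Spec_get_val_from_val get_val_from_val get_val_from_val_alt
  have hdd : dic.foldl (fun acc kv => acc ++ [kv.2]) [] = dic.map Prod.snd := by
    simpa using PySem.List.foldl_append_singleton_eq_map Prod.snd dic []
  have hr : top * -1 = -top := by ring
  rw [hdd, hr]
  set gg : List Int := PySem.List.slice (PySem.List.sorted (dic.map Prod.snd) (fun x => x)) (some (-top)) none with hgg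
  have hsorted : gg.Pairwise (· ≤ ·) := by
    have h1 : (PySem.List.sorted (dic.map Prod.snd) (fun x => x)).Pairwise (· ≤ ·) :=
      PySem.List.sorted_pairwise (dic.map Prod.snd) (fun x => x)
    rw [hgg, PySem.List.slice_some_none]
    exact h1.sublist (List.drop_sublist _ _)
  simp only [Prod.mk.injEq]
  exact ⟨rfl, firstIdx_eq_changePoints gg hsorted⟩
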